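-- pv_equiv track=rewrite | github.com/GundalaNikhil/DSA | dsa-problems/Bitwise/testcases/generate_all_testcases.py | bit005_max_subarray_xor_start
-- ===== SOURCE A (Python) =====
-- from typing import List, Dict, Any
--
-- def bit005_max_subarray_xor_start(a: List[int], s: int) -> int:
--     """BIT-005: Max Subarray XOR With Start"""
--     current_xor = 0
--     max_xor = 0
--     first = True
--     for i in range(s, len(a)):
--         current_xor ^= a[i]
--         if first:
--             max_xor = current_xor
--             first = False
--         else:
--             max_xor = max(max_xor, current_xor)
--     return max_xor
-- ===== SOURCE B (Python) =====
-- from typing import List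
--
-- def bit005_max_subarray_xor_start(a: List[int], s: int) -> int:
--     """BIT-005: Max Subarray XOR With Start.
--
--     Different algorithm: compute the total XOR of a[i] over range(s, len(a)),
--     then scan the same index range right-to-left keeping a suffix XOR; each
--     prefix XOR equals total ^ suffix, and the best is tracked over that scan.
--     """
--     idxs = range(s, len(a))
--     total = 0
--     for i in idxs:
--         total ^= a[i]
--     if len(idxs) == 0:
--         return 0
--     best = total
--     suf = 0
--     for i in reversed(idxs):
--         best = max(best, total ^ suf)
--         suf ^= a[i]
--     return best
-- ===== Notes on version B (the rewrite author's own statement) =====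
-- stated objective: alternative
-- what changed: B replaces A's single left-to-right running-max pass with a two-phase algorithm: first compute the total XOR of the index range, then scan the range right-to-left maintaining a suffix XOR and maximize total ^ suffix, using the identity prefix(i) = total ^ suffix(i+1..).
import Mathlib
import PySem

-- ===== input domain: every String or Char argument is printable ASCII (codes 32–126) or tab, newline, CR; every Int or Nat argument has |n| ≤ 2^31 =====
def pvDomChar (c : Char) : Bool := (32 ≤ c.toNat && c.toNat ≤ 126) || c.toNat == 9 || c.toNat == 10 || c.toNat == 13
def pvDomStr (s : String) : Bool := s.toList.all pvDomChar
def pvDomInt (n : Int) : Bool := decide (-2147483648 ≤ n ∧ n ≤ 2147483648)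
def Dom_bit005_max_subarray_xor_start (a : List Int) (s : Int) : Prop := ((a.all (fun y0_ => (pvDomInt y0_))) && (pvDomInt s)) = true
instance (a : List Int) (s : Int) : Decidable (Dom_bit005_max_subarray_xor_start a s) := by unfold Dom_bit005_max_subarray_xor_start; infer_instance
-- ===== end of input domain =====

-- ===== PORT A =====
-- B computes the range's total XOR and then scans right-to-left with a suffix XOR (prefix = total ^ suffix); A fuses accumulate and max left-to-right. Return-value equivalence on Pre_ (both raise IndexError when s < -len(a)).
def bit005_max_subarray_xor_start (a : List Int) (s : Int) : Int :=
  (((PySem.List.pyRange s a.length 1).foldl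
      (fun (st : Int × Int × Bool) i =>
        let c := PySem.Int.bxor st.1 (PySem.List.pyGetD a i 0)
        if st.2.2 then (c, c, false) else (c, max st.2.1 c, false))
      (0, 0, true)).2).1

-- ===== PORT B =====
def bit005_max_subarray_xor_start_alt (a : List Int) (s : Int) : Int :=
  let idxs := PySem.List.pyRange s a.length 1
  let total := idxs.foldl (fun t i => PySem.Int.bxor t (PySem.List.pyGetD a i 0)) 0
  if idxs.length = 0 then 0
  else
    (idxs.reverse.foldl
      (fun (st : Int × Int) i =>
        (max st.1 (PySem.Int.bxor total st.2), PySem.Int.bxor st.2 (PySem.List.pyGetD a i 0)))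
      (total, 0)).1

-- ===== PRECONDITION & SPEC =====
-- Pre_ excludes exactly the inputs where Python A raises IndexError: s < -len(a) (first index out of range).
def Pre_bit005_max_subarray_xor_start (a : List Int) (s : Int) : Prop := -(a.length : Int) ≤ s
instance (a : List Int) (s : Int) : Decidable (Pre_bit005_max_subarray_xor_start a s) := by unfold Pre_bit005_max_subarray_xor_start; infer_instance
def pvWitness_bit005_max_subarray_xor_start : List Int × Int := ([1, 2, 3], 0)

def Spec_bit005_max_subarray_xor_start (a : List Int) (s : Int) (out : Int) : Prop := out = bit005_max_subarray_xor_start_alt a s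
instance (a : List Int) (s : Int) (out : Int) : Decidable (Spec_bit005_max_subarray_xor_start a s out) := by unfold Spec_bit005_max_subarray_xor_start; infer_instance

-- ===== CLAIM =====
def Claim_equal_bit005_max_subarray_xor_start : Prop := ∀ (a : List Int) (s : Int), Dom_bit005_max_subarray_xor_start a s → Pre_bit005_max_subarray_xor_start a s → Spec_bit005_max_subarray_xor_start a s (bit005_max_subarray_xor_start a s)

-- ===== LEMMAS AND PROOFS =====

-- sign/magnitude view of bxor, to get associativity
def pvMag (a : Int) : Nat := if 0 ≤ a then a.toNat else (-a).toNat - 1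
def pvDec (sgn : Bool) (n : Nat) : Int := if sgn then -(n : Int) - 1 else (n : Int)

theorem pvBxor_eq (a b : Int) :
    PySem.Int.bxor a b = pvDec (xor (decide (a < 0)) (decide (b < 0))) (pvMag a ^^^ pvMag b) := by
  unfold PySem.Int.bxor pvDec pvMag
  rcases le_or_gt 0 a with ha | ha <;> rcases le_or_gt 0 b with hb | hb
  · simp [ha, hb, not_lt.mpr ha, not_lt.mpr hb]
  · simp [ha, hb, not_lt.mpr ha, not_le.mpr hb]
  · simp [ha, hb, not_le.mpr ha, not_lt.mpr hb]
  · simp [ha, hb, not_le.mpr ha, not_le.mpr hb]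

theorem pvMag_pvDec (sgn : Bool) (n : Nat) : pvMag (pvDec sgn n) = n := by
  cases sgn
  · simp [pvMag, pvDec]
  · simp only [pvMag, pvDec, if_true]
    rw [if_neg (by omega)]
    omega

theorem pvNeg_pvDec (sgn : Bool) (n : Nat) : decide (pvDec sgn n < 0) = sgn := by
  cases sgn
  · simp [pvDec]
  · simp [pvDec]
    omega

theorem pvBxor_assoc (a b c : Int) :
    PySem.Int.bxor (PySem.Int.bxor a b) c = PySem.Int.bxor a (PySem.Int.bxor b c) := by
  rw [pvBxor_eq a b, pvBxor_eq b c, pvBxor_eq (pvDec _ _) c, pvBxor_eq a (pvDec _ _),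
      pvMag_pvDec, pvMag_pvDec, pvNeg_pvDec, pvNeg_pvDec, Nat.xor_assoc, Bool.xor_assoc]

theorem pvBxor_zero_left (a : Int) : PySem.Int.bxor 0 a = a := by
  rw [PySem.Int.bxor_comm, PySem.Int.bxor_zero]

-- foldl bxor: closed form of the seed
theorem pvFoldXor_seed (l : List Int) : ∀ (x y : Int),
    l.foldl PySem.Int.bxor (PySem.Int.bxor x y) = PySem.Int.bxor x (l.foldl PySem.Int.bxor y) := by
  induction l with
  | nil => intro x y; rfl
  | cons v t ih => intro x y; simp only [List.foldl_cons, pvBxor_assoc, ih]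

theorem pvFoldXor_closed (l : List Int) (c : Int) :
    l.foldl PySem.Int.bxor c = PySem.Int.bxor c (l.foldl PySem.Int.bxor 0) := by
  have := pvFoldXor_seed l c 0
  rwa [PySem.Int.bxor_zero] at this

theorem pvFoldXor_swap (t : List Int) (c v : Int) :
    PySem.Int.bxor (t.foldl PySem.Int.bxor c) v = t.foldl PySem.Int.bxor (PySem.Int.bxor c v) := by
  rw [pvFoldXor_closed t c, pvFoldXor_closed t (PySem.Int.bxor c v),
      pvBxor_assoc c (t.foldl PySem.Int.bxor 0) v, pvBxor_assoc c v (t.foldl PySem.Int.bxor 0),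
      PySem.Int.bxor_comm (t.foldl PySem.Int.bxor 0) v]

-- xor-fold is reverse-invariant
theorem pvFoldXor_reverse (l : List Int) : ∀ (c : Int),
    l.reverse.foldl PySem.Int.bxor c = l.foldl PySem.Int.bxor c := by
  induction l with
  | nil => intro c; rfl
  | cons v t ih =>
    intro c
    simp only [List.reverse_cons, List.foldl_append, List.foldl_cons, List.foldl_nil, ih]
    exact pvFoldXor_swap t c v

-- max-fold helper lemmas
theorem pvFoldMax_comm (l : List Int) : ∀ (b x : Int),
    l.foldl max (max b x) = max (l.foldl max b) x := by
  induction l with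
  | nil => intro b x; rfl
  | cons v t ih =>
    intro b x
    simp only [List.foldl_cons]
    rw [max_right_comm b x v, ih]

theorem pvFoldMax_reverse (l : List Int) : ∀ (b : Int),
    l.reverse.foldl max b = l.foldl max b := by
  induction l with
  | nil => intro b; rfl
  | cons v t ih =>
    intro b
    simp only [List.reverse_cons, List.foldl_append, List.foldl_cons, List.foldl_nil, ih]
    rw [← pvFoldMax_comm t b v]

theorem pvSeed_le_foldMax (l : List Int) : ∀ (b : Int), b ≤ l.foldl max b := by
  induction l with
  | nil => intro b; exact le_refl b
  | cons v t ih => intro b; exact le_trans (le_max_left b v) (ih (max b v))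

theorem pvMem_le_foldMax (l : List Int) : ∀ (b x : Int), x ∈ l → x ≤ l.foldl max b := by
  induction l with
  | nil => intro b x h; cases h
  | cons v t ih =>
    intro b x h
    rcases List.mem_cons.mp h with h | h
    · subst h; exact le_trans (le_max_right b x) (pvSeed_le_foldMax t _)
    · exact ih (max b v) x h

-- the prefix-XOR table (A's running values)
def pvAccumXor (c : Int) : List Int → List Int
  | [] => []
  | v :: t => (PySem.Int.bxor c v) :: pvAccumXor (PySem.Int.bxor c v) t

-- the candidate stream of B's reverse scan
def pvG (x : Int) : List Int → List Int
  | [] => []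
  | v :: t => x :: pvG (PySem.Int.bxor x v) t

theorem pvG_append (l1 l2 : List Int) : ∀ (x : Int),
    pvG x (l1 ++ l2) = pvG x l1 ++ pvG (l1.foldl PySem.Int.bxor x) l2 := by
  induction l1 with
  | nil => intro x; rfl
  | cons v t ih => intro x; simp only [List.cons_append, pvG, ih, List.foldl_cons]

-- MAIN: B's candidates over the reversed range are A's prefix table reversed
theorem pvG_reverse (vs : List Int) : ∀ (c : Int),
    pvG (vs.foldl PySem.Int.bxor c) vs.reverse = (pvAccumXor c vs).reverse := by
  induction vs with
  | nil => intro c; rfl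
  | cons v t ih =>
    intro c
    simp only [List.foldl_cons, List.reverse_cons, pvG_append, pvAccumXor, ih]
    have hlast : t.reverse.foldl PySem.Int.bxor (t.foldl PySem.Int.bxor (PySem.Int.bxor c v))
        = PySem.Int.bxor c v := by
      rw [pvFoldXor_reverse, pvFoldXor_closed t (t.foldl PySem.Int.bxor (PySem.Int.bxor c v)),
          pvFoldXor_closed t (PySem.Int.bxor c v),
          pvBxor_assoc, PySem.Int.bxor_self, PySem.Int.bxor_zero]
    rw [hlast]
    simp [pvG]

-- B's reverse fold equals a max-fold over its candidate stream
theorem pvFoldB (total : Int) (r : List Int) : ∀ (best suf : Int),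
    (r.foldl (fun (st : Int × Int) v =>
        (max st.1 (PySem.Int.bxor total st.2), PySem.Int.bxor st.2 v)) (best, suf)).1
      = (pvG (PySem.Int.bxor total suf) r).foldl max best := by
  induction r with
  | nil => intro best suf; rfl
  | cons v t ih =>
    intro best suf
    simp only [List.foldl_cons, pvG]
    rw [ih, pvBxor_assoc]

-- A's loop with first = false is the running max over the prefix table
theorem pvLoop_false_eq (vs : List Int) : ∀ (c mx : Int),
    ((vs.foldl (fun (st : Int × Int × Bool) v =>
        let c := PySem.Int.bxor st.1 v
        if st.2.2 then (c, c, false) else (c, max st.2.1 c, false)) (c, mx, false)).2).1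
      = (pvAccumXor c vs).foldl max mx := by
  induction vs with
  | nil => intro c mx; rfl
  | cons v t ih => intro c mx; simpa [pvAccumXor] using ih (PySem.Int.bxor c v) (max mx (PySem.Int.bxor c v))

-- the total XOR is one of the prefix values (the last one)
theorem pvTotal_mem (t : List Int) : ∀ (c : Int),
    t.foldl PySem.Int.bxor c ∈ c :: pvAccumXor c t := by
  induction t with
  | nil => intro c; simp
  | cons v r ih =>
    intro c
    simp only [List.foldl_cons, pvAccumXor]
    rcases List.mem_cons.mp (ih (PySem.Int.bxor c v)) with h | h
    · rw [h]; simp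
    · exact List.mem_cons_of_mem _ (List.mem_cons_of_mem _ h)

-- value-level core: A's fused pass = B's total+reverse-suffix pass, over any value list
theorem pvCore (vs : List Int) :
    ((vs.foldl (fun (st : Int × Int × Bool) v =>
        let c := PySem.Int.bxor st.1 v
        if st.2.2 then (c, c, false) else (c, max st.2.1 c, false)) (0, 0, true)).2).1
      = (if vs.length = 0 then 0
         else (vs.reverse.foldl (fun (st : Int × Int) v =>
            (max st.1 (PySem.Int.bxor (vs.foldl PySem.Int.bxor 0) st.2),
             PySem.Int.bxor st.2 v)) (vs.foldl PySem.Int.bxor 0, 0)).1) := by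
  cases vs with
  | nil => rfl
  | cons v t =>
    have h0 : PySem.Int.bxor 0 v = v := pvBxor_zero_left v
    -- A side
    have hA : (((v :: t).foldl (fun (st : Int × Int × Bool) v =>
        let c := PySem.Int.bxor st.1 v
        if st.2.2 then (c, c, false) else (c, max st.2.1 c, false)) (0, 0, true)).2).1
        = (pvAccumXor v t).foldl max v := by
      simpa [h0] using pvLoop_false_eq t v v
    -- B side
    have hacc : pvAccumXor 0 (v :: t) = v :: pvAccumXor v t := by
      simp [pvAccumXor, h0]
    have hB : (((v :: t).reverse).foldl (fun (st : Int × Int) w =>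
            (max st.1 (PySem.Int.bxor ((v :: t).foldl PySem.Int.bxor 0) st.2),
             PySem.Int.bxor st.2 w)) ((v :: t).foldl PySem.Int.bxor 0, 0)).1
        = (v :: pvAccumXor v t).foldl max ((v :: t).foldl PySem.Int.bxor 0) := by
      rw [pvFoldB, PySem.Int.bxor_zero, pvG_reverse (v :: t) 0, hacc, pvFoldMax_reverse]
    -- the total is one of the prefixes, hence absorbed by the max
    have hmem : (v :: t).foldl PySem.Int.bxor 0 ∈ v :: pvAccumXor v t := by
      have := pvTotal_mem t v
      simpa [List.foldl_cons, h0] using this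
    have hle : (v :: t).foldl PySem.Int.bxor 0 ≤ (pvAccumXor v t).foldl max v := by
      rcases List.mem_cons.mp hmem with h | h
      · rw [h]; exact pvSeed_le_foldMax _ v
      · exact pvMem_le_foldMax _ v _ h
    have hT : (v :: t).foldl PySem.Int.bxor 0 = t.foldl PySem.Int.bxor v := by
      simp [List.foldl_cons, h0]
    rw [hT] at hle
    rw [hA, if_neg (by simp), hB]
    simp only [List.foldl_cons, h0]
    rw [max_comm (t.foldl PySem.Int.bxor v) v,
        pvFoldMax_comm (pvAccumXor v t) v (t.foldl PySem.Int.bxor v)]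
    exact (max_eq_left hle).symm

-- ===== VERDICT =====
theorem bit005_max_subarray_xor_start_spec : Claim_equal_bit005_max_subarray_xor_start := by
  intro a s _ _
  unfold Spec_bit005_max_subarray_xor_start bit005_max_subarray_xor_start bit005_max_subarray_xor_start_alt
  have := pvCore ((PySem.List.pyRange s a.length 1).map (fun i => PySem.List.pyGetD a i 0))
  simpa [List.foldl_map, List.length_map, ← List.map_reverse] using this
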